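-- pv_equiv track=rewrite | github.com/ZZZZzzzzac/Daggerheart_sealdice | beast_feast.py | find_and_process_matches
-- ===== SOURCE A (Python) =====
-- from collections import Counter
--
-- def find_and_process_matches(roll_results):
--     """
--     从掷骰结果中寻找匹配项。
--     返回: (匹配组合的分数, 剩余的骰子索引)
--     """
--     value_counts = Counter(roll_results.values())
--     matched_score = 0
--     remaining_indices = list(roll_results.keys())
--
--     for value, count in value_counts.items():
--         if count > 1:
--             matched_score += value
--             # 移除所有掷出该点数的骰子
--             indices_to_remove = [idx for idx, val in roll_results.items() if val == value]
--             for idx in indices_to_remove: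
--                 if idx in remaining_indices:
--                     remaining_indices.remove(idx)
--
--     return matched_score, remaining_indices
-- ===== SOURCE B (Python) =====
-- from collections import Counter
--
-- def find_and_process_matches(roll_results):
--     """
--     从掷骰结果中寻找匹配项。
--     返回: (匹配组合的分数, 剩余的骰子索引)
--     """
--     counts = Counter(roll_results.values())
--     matched_score = sum(v for v, c in counts.items() if c > 1)
--     remaining_indices = [k for k, v in roll_results.items() if counts[v] == 1]
--     return matched_score, remaining_indices
-- ===== Notes on version B (the rewrite author's own statement) =====
-- stated objective: faster
-- what changed: B builds the value Counter once and does a single filter pass (keep keys whose value count is 1, sum distinct values with count > 1), replacing A's per-value inner scan over all items plus repeated list.remove calls.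
import Mathlib
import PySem

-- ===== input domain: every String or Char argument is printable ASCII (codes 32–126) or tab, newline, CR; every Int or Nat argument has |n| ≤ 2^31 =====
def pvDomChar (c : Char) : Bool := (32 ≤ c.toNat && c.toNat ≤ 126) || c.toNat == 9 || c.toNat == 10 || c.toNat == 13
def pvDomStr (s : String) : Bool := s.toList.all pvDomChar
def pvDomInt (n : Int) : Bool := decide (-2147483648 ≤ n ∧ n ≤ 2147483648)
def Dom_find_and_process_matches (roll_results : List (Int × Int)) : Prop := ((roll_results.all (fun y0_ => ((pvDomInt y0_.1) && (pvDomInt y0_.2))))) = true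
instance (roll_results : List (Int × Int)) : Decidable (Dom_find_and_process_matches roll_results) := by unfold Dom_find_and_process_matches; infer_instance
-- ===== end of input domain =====

-- B replaces A's per-value index scans and repeated list.remove calls by a single
-- Counter-driven filter pass over the items (objective: faster).

-- ===== PORT A =====
-- The Python parameter is a dict; the association list is first turned into that dict
-- (insertion order, a later duplicate key overwrites in place), exactly as Python builds it.
def pvToDict (roll_results : List (Int × Int)) : PySem.Dict Int Int :=
  roll_results.foldl (fun d p => d.insert p.1 p.2) PySem.Dict.empty

def find_and_process_matches (roll_results : List (Int × Int)) : Int × List Int :=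
  let d := pvToDict roll_results
  let value_counts := PySem.Dict.counter d.values
  let init : Int × List Int := (0, d.keys)
  value_counts.items.foldl
    (fun st vc =>
      if 1 < vc.2 then
        let indices_to_remove := (d.items.filter (fun p => p.2 == vc.1)).map (·.1)
        (st.1 + vc.1,
         indices_to_remove.foldl
           (fun rem idx => if rem.contains idx then (PySem.List.remove? rem idx).getD rem else rem)
           st.2)
      else st)
    init

-- ===== PORT B =====
def find_and_process_matches_alt (roll_results : List (Int × Int)) : Int × List Int :=
  let d := pvToDict roll_results
  let counts := PySem.Dict.counter d.values
  let matched_score := ((counts.items.filter (fun vc => 1 < vc.2)).map (·.1)).sum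
  let remaining_indices := (d.items.filter (fun p => counts.getD p.2 0 == 1)).map (·.1)
  (matched_score, remaining_indices)

-- ===== PRECONDITION & SPEC =====
def Spec_find_and_process_matches (roll_results : List (Int × Int)) (out : Int × List Int) : Prop := out = find_and_process_matches_alt roll_results
instance (roll_results : List (Int × Int)) (out : Int × List Int) : Decidable (Spec_find_and_process_matches roll_results out) := by unfold Spec_find_and_process_matches; infer_instance

-- ===== CLAIM (what is proved, stated in full; the proofs are below) =====
def Claim_equal_find_and_process_matches : Prop := ∀ (roll_results : List (Int × Int)), Dom_find_and_process_matches roll_results → Spec_find_and_process_matches roll_results (find_and_process_matches roll_results)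

-- ===== LEMMAS AND PROOFS =====

-- one guarded remove on a duplicate-free list is a filter
theorem pv_step_remove (rem : List Int) (hnd : rem.Nodup) (x : Int) :
    (if rem.contains x then (PySem.List.remove? rem x).getD rem else rem)
      = rem.filter (fun a => a != x) := by
  by_cases hx : x ∈ rem
  · rw [if_pos (by simpa using hx), PySem.List.remove?_eq_some_erase rem x hx, Option.getD_some,
      List.Nodup.erase_eq_filter hnd]
  · rw [if_neg (by simpa using hx)]
    symm
    rw [List.filter_eq_self]
    intro a ha
    simp only [bne_iff_ne, ne_eq]
    exact fun h => hx (h ▸ ha)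

-- removing each element of xs in turn from a duplicate-free list is a filter
theorem pv_removeAll (xs : List Int) (rem : List Int) (hnd : rem.Nodup) :
    xs.foldl (fun rem idx => if rem.contains idx then (PySem.List.remove? rem idx).getD rem else rem) rem
      = rem.filter (fun a => !xs.contains a) := by
  induction xs generalizing rem with
  | nil =>
    simp only [List.foldl_nil]
    symm; rw [List.filter_eq_self]; intro a _; simp
  | cons x xs ih =>
    rw [List.foldl_cons, pv_step_remove rem hnd x, ih _ (hnd.filter _), List.filter_filter]
    apply List.filter_congr
    intro a _
    simp only [List.contains_cons, Bool.not_or, bne]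
    exact Bool.and_comm _ _

-- keys removed while processing the counter-items prefix cs
def pvBad (l : List (Int × Int)) (cs : List (Int × Int)) (a : Int) : Bool :=
  cs.any (fun vc => 1 < vc.2 && ((l.filter (fun p => p.2 == vc.1)).map (·.1)).contains a)

theorem pv_fold_loop (l : List (Int × Int)) (cs : List (Int × Int)) (s : Int)
    (rem : List Int) (hnd : rem.Nodup) :
    cs.foldl
      (fun st vc =>
        if 1 < vc.2 then
          let indices_to_remove := (l.filter (fun p => p.2 == vc.1)).map (·.1)
          (st.1 + vc.1,
           indices_to_remove.foldl
             (fun rem idx => if rem.contains idx then (PySem.List.remove? rem idx).getD rem else rem)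
             st.2)
        else st)
      (s, rem)
    = (s + ((cs.filter (fun vc => 1 < vc.2)).map (·.1)).sum,
       rem.filter (fun a => !pvBad l cs a)) := by
  induction cs generalizing s rem with
  | nil =>
    simp only [List.foldl_nil, List.filter_nil, List.map_nil, List.sum_nil, add_zero]
    congr 1
    symm; rw [List.filter_eq_self]; intro a _; simp [pvBad]
  | cons vc cs ih =>
    rw [List.foldl_cons]
    by_cases h : 1 < vc.2
    · rw [if_pos h]
      simp only
      rw [pv_removeAll _ rem hnd, ih _ _ (hnd.filter _), List.filter_filter]
      simp only [Prod.mk.injEq]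
      constructor
      · rw [List.filter_cons_of_pos (by simpa using h), List.map_cons, List.sum_cons]
        ring
      · apply List.filter_congr
        intro a _
        simp only [pvBad, List.any_cons, Bool.not_or, h, decide_true,
          Bool.true_and, Bool.and_comm]
    · rw [if_neg h]
      rw [ih _ _ hnd]
      simp only [Prod.mk.injEq]
      constructor
      · rw [List.filter_cons_of_neg (by simpa using h)]
      · apply List.filter_congr
        intro a _
        simp [pvBad, h]

-- duplicate-key-free items of the dict built from the argument
theorem pv_keys_nodup (rr : List (Int × Int)) : ((pvToDict rr).items.map (·.1)).Nodup := by
  have h := PySem.Dict.nodup_keys_foldl_insert_key rr (fun p : Int × Int => p.1)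
      (fun _ p => p.2) PySem.Dict.empty PySem.Dict.nodup_keys_empty
  simpa [PySem.Dict.keys] using h

-- a key is removed by A's loop iff its value occurs more than once
theorem pv_bad_iff (l : List (Int × Int)) (hk : (l.map (·.1)).Nodup)
    (p : Int × Int) (hp : p ∈ l) :
    pvBad l (PySem.Dict.counter (l.map (·.2))).items p.1 = true
      ↔ 1 < (l.map (·.2)).count p.2 := by
  simp only [pvBad, PySem.Dict.items_counter, List.any_eq_true, List.mem_map,
    Bool.and_eq_true, decide_eq_true_eq, List.contains_eq_mem, List.mem_filter,
    beq_iff_eq]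
  constructor
  · rintro ⟨vc, ⟨v, hv, rfl⟩, h1, hmem⟩
    rcases hmem with ⟨q, ⟨hq, hqv⟩, hq1⟩
    have hqp : q = p := List.inj_on_of_nodup_map hk hq hp hq1
    subst hqp
    subst hqv
    have h1' : (1 : Int) < ((l.map (·.2)).count q.2 : Int) := h1
    exact_mod_cast h1'
  · intro h1
    refine ⟨(p.2, ((l.map (·.2)).count p.2 : Int)), ⟨p.2, ?_, rfl⟩,
      show (1 : Int) < ((l.map (·.2)).count p.2 : Int) from by exact_mod_cast h1,
      ⟨p, ⟨hp, rfl⟩, rfl⟩⟩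
    rw [PySem.Set.mem_ofList]
    exact List.mem_map_of_mem hp

-- ===== VERDICT (by name: the statement is the Claim_ definition above) =====
theorem find_and_process_matches_spec : Claim_equal_find_and_process_matches := by
  intro rr _
  unfold Spec_find_and_process_matches
  have hk := pv_keys_nodup rr
  simp only [find_and_process_matches, find_and_process_matches_alt]
  rw [PySem.Dict.keys, PySem.Dict.values] at *
  rw [pv_fold_loop ((pvToDict rr).items) _ 0 _ hk, zero_add]
  congr 1
  rw [show ((pvToDict rr).items.map (·.1)).filter
        (fun a => !pvBad (pvToDict rr).items (PySem.Dict.counter ((pvToDict rr).items.map (·.2))).items a)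
      = ((pvToDict rr).items.filter
        (fun p => !pvBad (pvToDict rr).items (PySem.Dict.counter ((pvToDict rr).items.map (·.2))).items p.1)).map (·.1)
    from by simp only [List.filter_map]; rfl]
  congr 1
  apply List.filter_congr
  intro p hp
  have hbad := pv_bad_iff (pvToDict rr).items hk p hp
  have hpos : 0 < ((pvToDict rr).items.map (·.2)).count p.2 :=
    List.count_pos_iff.mpr (List.mem_map_of_mem hp)
  rw [PySem.Dict.getD_counter]
  cases hb : pvBad (pvToDict rr).items (PySem.Dict.counter ((pvToDict rr).items.map (·.2))).items p.1 with
  | true =>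
    have := hbad.mp hb
    simp only [Bool.not_true]
    symm
    simp only [beq_eq_false_iff_ne, ne_eq]
    intro hcontra
    have hc : ((pvToDict rr).items.map (·.2)).count p.2 = 1 := by exact_mod_cast hcontra
    omega
  | false =>
    have : ¬ 1 < ((pvToDict rr).items.map (·.2)).count p.2 := fun h => by
      rw [hbad.mpr h] at hb; cases hb
    simp only [Bool.not_false]
    symm
    rw [beq_iff_eq]
    have hc : ((pvToDict rr).items.map (·.2)).count p.2 = 1 := by omega
    exact_mod_cast hc
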